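-- pv_equiv track=rewrite | github.com/saini-rahul/bio-ner | scripts/utilities.py | convert_to_multi_output
-- ===== SOURCE A (Python) =====
-- def convert_to_multi_output (ds_y, max_len):
--     y = []
--     for i, ds in enumerate(ds_y):
--             t = []
--             for pre in range(0,i):
--                 len_ds = len(ds_y [pre])
--                 listofzeros = [[0]*max_len]*len_ds
--                 t.extend (listofzeros)
--             t.extend (ds_y[i])
--             for post in range (i+1, len(ds_y)):
--                 len_ds = len(ds_y [post])
--                 listofzeros = [[0]*max_len]*len_ds
--                 t.extend(listofzeros)
--             y.append (t)
--     return y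
-- ===== SOURCE B (Python) =====
-- def convert_to_multi_output(ds_y, max_len):
--     lens = [len(d) for d in ds_y]
--     total = sum(lens)
--     zero = [0] * max_len
--     base = [zero[:] for _ in range(total)]
--     out = []
--     off = 0
--     for d, L in zip(ds_y, lens):
--         row = list(base)
--         row[off:off + L] = d
--         out.append(row)
--         off += L
--     return out
-- ===== Notes on version B (the rewrite author's own statement) =====
-- stated objective: alternative
-- what changed: B precomputes all block lengths and the total row count once, builds a single flat zero matrix, and produces each output entry by slice-assigning the real rows into a copy of it at a running offset, instead of A's per-entry pre/post loops that extend with freshly built zero blocks.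
import Mathlib
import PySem

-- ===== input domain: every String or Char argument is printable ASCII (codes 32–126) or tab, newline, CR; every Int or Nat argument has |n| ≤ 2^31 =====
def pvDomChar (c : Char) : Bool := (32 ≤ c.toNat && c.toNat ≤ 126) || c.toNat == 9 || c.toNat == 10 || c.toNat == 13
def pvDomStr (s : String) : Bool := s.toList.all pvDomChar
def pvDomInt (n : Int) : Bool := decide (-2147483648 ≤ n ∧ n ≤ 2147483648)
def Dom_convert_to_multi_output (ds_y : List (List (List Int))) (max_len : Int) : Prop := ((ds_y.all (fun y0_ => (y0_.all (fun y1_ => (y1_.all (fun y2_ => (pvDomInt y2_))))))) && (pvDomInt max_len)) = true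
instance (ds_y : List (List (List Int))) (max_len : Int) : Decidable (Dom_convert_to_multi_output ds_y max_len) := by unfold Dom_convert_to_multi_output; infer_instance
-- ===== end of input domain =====

-- B builds an offset table and splices each block into one precomputed flat zero matrix
-- instead of A's three sequential extend-loops per entry; same cost, different decomposition.

-- ===== PORT A =====
-- [[0]*max_len]*len_ds  ([0]*k on a negative k is [], matched by Int.toNat's clamp)
def pvZeros (max_len : Int) (len_ds : Nat) : List (List Int) :=
  List.replicate len_ds (List.replicate max_len.toNat 0)

def convert_to_multi_output (ds_y : List (List (List Int))) (max_len : Int) : List (List (List Int)) :=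
  (List.range ds_y.length).foldl (fun y i =>
    let t : List (List Int) :=
      (List.range i).foldl (fun t pre => t ++ pvZeros max_len (ds_y.getD pre []).length) []
    let t := t ++ ds_y.getD i []
    let t := (List.range' (i+1) (ds_y.length - (i+1))).foldl
      (fun t post => t ++ pvZeros max_len (ds_y.getD post []).length) t
    y ++ [t]) []

-- ===== PORT B =====
def convert_to_multi_output_alt (ds_y : List (List (List Int))) (max_len : Int) : List (List (List Int)) :=
  let lens := ds_y.map List.length
  let total := lens.sum
  let zero : List Int := List.replicate max_len.toNat 0
  let base : List (List Int) := List.replicate total zero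
  -- row[off:off+L] = d  is the splice take/d/drop (0 ≤ off, off+L ≤ total always hold here)
  (ds_y.foldl (fun (s : List (List (List Int)) × Nat) d =>
      let row := base.take s.2 ++ d ++ base.drop (s.2 + d.length)
      (s.1 ++ [row], s.2 + d.length)) ([], 0)).1

-- ===== PRECONDITION & SPEC =====
def Spec_convert_to_multi_output (ds_y : List (List (List Int))) (max_len : Int) (out : List (List (List Int))) : Prop := out = convert_to_multi_output_alt ds_y max_len
instance (ds_y : List (List (List Int))) (max_len : Int) (out : List (List (List Int))) : Decidable (Spec_convert_to_multi_output ds_y max_len out) := by unfold Spec_convert_to_multi_output; infer_instance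

-- ===== CLAIM (what is proved, stated in full; the proofs are below) =====
def Claim_equal_convert_to_multi_output : Prop := ∀ (ds_y : List (List (List Int))) (max_len : Int), Dom_convert_to_multi_output ds_y max_len → Spec_convert_to_multi_output ds_y max_len (convert_to_multi_output ds_y max_len)

-- ===== LEMMAS AND PROOFS =====

-- total row count of a list of blocks
def pvSumLen (l : List (List (List Int))) : Nat := (l.map List.length).sum

-- the value both programs produce for entry i
def pvCanon (ds_y : List (List (List Int))) (z : List Int) (i : Nat) : List (List Int) :=
  List.replicate (pvSumLen (ds_y.take i)) z ++ ds_y.getD i [] ++ List.replicate (pvSumLen (ds_y.drop (i+1))) z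

theorem pvSumLen_append (a b : List (List (List Int))) :
    pvSumLen (a ++ b) = pvSumLen a + pvSumLen b := by
  simp [pvSumLen]

theorem pv_pre_flatMap (ds_y : List (List (List Int))) (max_len : Int) :
    ∀ i, i ≤ ds_y.length →
      (List.range i).flatMap (fun p => pvZeros max_len (ds_y.getD p []).length)
        = List.replicate (pvSumLen (ds_y.take i)) (List.replicate max_len.toNat 0) := by
  intro i
  induction i with
  | zero => simp [pvSumLen]
  | succ k ih =>
      intro hk
      have hk' : k < ds_y.length := hk
      rw [List.range_succ, List.flatMap_append, ih (Nat.le_of_lt hk')]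
      have htake : ds_y.take (k+1) = ds_y.take k ++ [ds_y[k]] := by
        rw [List.take_succ]
        simp [List.getElem?_eq_getElem hk']
      rw [htake, pvSumLen_append]
      rw [show pvSumLen [ds_y[k]] = (ds_y.getD k []).length from by
        simp [pvSumLen, List.getD, List.getElem?_eq_getElem hk']]
      rw [List.replicate_add]
      congr 1
      simp [pvZeros]

theorem pv_post_flatMap (ds_y : List (List (List Int))) (max_len : Int) :
    ∀ k s, s + k ≤ ds_y.length →
      (List.range' s k).flatMap (fun p => pvZeros max_len (ds_y.getD p []).length)
        = List.replicate (pvSumLen ((ds_y.drop s).take k)) (List.replicate max_len.toNat 0) := by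
  intro k
  induction k with
  | zero => intro s _; simp [pvSumLen]
  | succ m ih =>
      intro s hs
      have hs' : s < ds_y.length := by omega
      rw [List.range'_succ, List.flatMap_cons, ih (s+1) (by omega)]
      have hdrop : ds_y.drop s = ds_y[s] :: ds_y.drop (s+1) := by
        rw [List.drop_eq_getElem_cons hs']
      rw [hdrop, List.take_succ_cons]
      rw [show pvSumLen (ds_y[s] :: (ds_y.drop (s+1)).take m)
            = ds_y[s].length + pvSumLen ((ds_y.drop (s+1)).take m) from by simp [pvSumLen]]
      rw [List.replicate_add]
      congr 1
      simp [pvZeros, List.getD, List.getElem?_eq_getElem hs']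

-- A's inner body equals pvCanon
theorem pvA_body (ds_y : List (List (List Int))) (max_len : Int) (i : Nat)
    (hi : i < ds_y.length) :
    ((List.range' (i+1) (ds_y.length - (i+1))).foldl
        (fun t post => t ++ pvZeros max_len (ds_y.getD post []).length)
        (((List.range i).foldl (fun t pre => t ++ pvZeros max_len (ds_y.getD pre []).length) [])
          ++ ds_y.getD i []))
      = pvCanon ds_y (List.replicate max_len.toNat 0) i := by
  rw [PySem.List.foldl_append_eq_flatMap, PySem.List.foldl_append_eq_flatMap]
  rw [pv_pre_flatMap ds_y max_len i (Nat.le_of_lt hi),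
      pv_post_flatMap ds_y max_len (ds_y.length - (i+1)) (i+1) (by omega)]
  have : (ds_y.drop (i+1)).take (ds_y.length - (i+1)) = ds_y.drop (i+1) := by
    apply List.take_of_length_le; simp
  rw [this]
  simp [pvCanon]

theorem pvA_eq_map (ds_y : List (List (List Int))) (max_len : Int) :
    convert_to_multi_output ds_y max_len
      = (List.range ds_y.length).map (pvCanon ds_y (List.replicate max_len.toNat 0)) := by
  unfold convert_to_multi_output
  rw [PySem.List.foldl_append_singleton_eq_map]
  simp only [List.nil_append]
  apply List.map_congr_left
  intro i hi
  rw [List.mem_range] at hi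
  exact pvA_body ds_y max_len i hi

-- B's fold, unrolled against a decomposition ds_y = pre ++ suf with off = pvSumLen pre
theorem pvB_fold (ds_y : List (List (List Int))) (max_len : Int) :
    ∀ (suf pre : List (List (List Int))) (acc : List (List (List Int))),
      ds_y = pre ++ suf →
      (suf.foldl (fun (s : List (List (List Int)) × Nat) d =>
          let row := (List.replicate (pvSumLen ds_y) (List.replicate max_len.toNat 0)).take s.2
            ++ d ++ (List.replicate (pvSumLen ds_y) (List.replicate max_len.toNat 0)).drop (s.2 + d.length)
          (s.1 ++ [row], s.2 + d.length)) (acc, pvSumLen pre)).1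
        = acc ++ (List.range' pre.length suf.length).map
            (pvCanon ds_y (List.replicate max_len.toNat 0)) := by
  intro suf
  induction suf with
  | nil => intro pre acc _; simp
  | cons d suf' ih =>
      intro pre acc hds
      have hds' : ds_y = (pre ++ [d]) ++ suf' := by simpa using hds
      have hoff : pvSumLen pre + d.length = pvSumLen (pre ++ [d]) := by
        simp [pvSumLen]
      rw [List.foldl_cons]
      simp only [hoff]
      rw [ih (pre ++ [d]) _ hds']
      have htot : pvSumLen ds_y = pvSumLen pre + d.length + pvSumLen suf' := by
        rw [hds']; simp [pvSumLen]; try omega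
      have hrow : (List.replicate (pvSumLen ds_y) (List.replicate max_len.toNat 0)).take (pvSumLen pre)
            ++ d ++ (List.replicate (pvSumLen ds_y) (List.replicate max_len.toNat 0)).drop (pvSumLen (pre ++ [d]))
          = pvCanon ds_y (List.replicate max_len.toNat 0) pre.length := by
        rw [List.take_replicate, List.drop_replicate]
        have h1 : min (pvSumLen pre) (pvSumLen ds_y) = pvSumLen pre := by omega
        have h2 : pvSumLen ds_y - pvSumLen (pre ++ [d]) = pvSumLen suf' := by omega
        rw [h1, h2]
        have htake : ds_y.take pre.length = pre := by
          rw [hds, List.take_left]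
        have hget : ds_y.getD pre.length [] = d := by
          simp [hds, List.getD]
        have hdrop : ds_y.drop (pre.length + 1) = suf' := by
          rw [hds', show pre.length + 1 = (pre ++ [d]).length by simp]
          exact List.drop_left
        rw [pvCanon, htake, hget, hdrop]
      rw [hrow]
      simp [List.range'_succ]

theorem pvB_eq_map (ds_y : List (List (List Int))) (max_len : Int) :
    convert_to_multi_output_alt ds_y max_len
      = (List.range ds_y.length).map (pvCanon ds_y (List.replicate max_len.toNat 0)) := by
  have h := pvB_fold ds_y max_len ds_y [] [] rfl
  rw [show pvSumLen ([] : List (List (List Int))) = 0 from rfl] at h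
  simp only [List.length_nil, List.nil_append] at h
  show (ds_y.foldl (fun (s : List (List (List Int)) × Nat) d =>
      (s.1 ++ [(List.replicate (pvSumLen ds_y) (List.replicate max_len.toNat 0)).take s.2
        ++ d ++ (List.replicate (pvSumLen ds_y) (List.replicate max_len.toNat 0)).drop (s.2 + d.length)],
        s.2 + d.length)) ([], 0)).1
    = (List.range ds_y.length).map (pvCanon ds_y (List.replicate max_len.toNat 0))
  rw [h, List.range_eq_range']

-- ===== VERDICT (by name: the statement is the Claim_ definition above) =====
theorem convert_to_multi_output_spec : Claim_equal_convert_to_multi_output := by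
  intro ds_y max_len _
  unfold Spec_convert_to_multi_output
  rw [pvA_eq_map, pvB_eq_map]
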